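-- pv_equiv track=rewrite | github.com/mariodportillo/cs106A | cryptography/crypto.py | compute_slug
-- ===== SOURCE A (Python) =====
-- ALPHABET = ['a', 'b', 'c', 'd', 'e', 'f', 'g', 'h', 'i', 'j', 'k', 'l', 'm', 'n', 'o', 'p', 'q', 'r', 's', 't', 'u',
--             'v', 'w', 'x', 'y', 'z']
--
-- def compute_slug(key):
--     """
--     :param key: A string used to create a slug.
--     :return slug: A slug which is used to encrypt messages.
--
--     Given a key string, compute and return the len-26 slug list for it.
--     >>> compute_slug('z')
--     ['z', 'a', 'b', 'c', 'd', 'e', 'f', 'g', 'h', 'i', 'j', 'k', 'l', 'm', 'n', 'o', 'p', 'q', 'r', 's', 't', 'u', 'v', 'w', 'x', 'y']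
--     >>> compute_slug('Bananas!')
--     ['b', 'a', 'n', 's', 'c', 'd', 'e', 'f', 'g', 'h', 'i', 'j', 'k', 'l', 'm', 'o', 'p', 'q', 'r', 't', 'u', 'v', 'w', 'x', 'y', 'z']
--     >>> compute_slug('Life, Liberty, and')
--     ['l', 'i', 'f', 'e', 'b', 'r', 't', 'y', 'a', 'n', 'd', 'c', 'g', 'h', 'j', 'k', 'm', 'o', 'p', 'q', 's', 'u', 'v', 'w', 'x', 'z']
--     >>> compute_slug('Zounds!')
--     ['z', 'o', 'u', 'n', 'd', 's', 'a', 'b', 'c', 'e', 'f', 'g', 'h', 'i', 'j', 'k', 'l', 'm', 'p', 'q', 'r', 't', 'v', 'w', 'x', 'y']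
--     """
--     result = []
--
--     # This for loop allows us to loop through each letter in key and if the letter is in the
--     # ALPHABET and not already in the list add it to result.
--
--     for i in key:
--         ch = i.lower()
--         if ch in ALPHABET and ch not in result:
--             result.append(ch)
--
--     # This for loop goes through the ALPHABET list and adds anything that is not in result into result.
--     for i in ALPHABET:
--         if i not in result:
--             result.append(i)
--
--     return result
-- ===== SOURCE B (Python) =====
-- ALPHABET = ['a', 'b', 'c', 'd', 'e', 'f', 'g', 'h', 'i', 'j', 'k', 'l', 'm', 'n', 'o', 'p', 'q', 'r', 's', 't', 'u',
--             'v', 'w', 'x', 'y', 'z']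
--
--
-- def compute_slug(key):
--     k = key.lower()
--     # rank of a letter = position of its first occurrence in the lowered key
--     # (letters absent from the key all share rank len(k) and fall back to
--     # alphabetical order via the second tuple component).
--     return sorted(ALPHABET, key=lambda c: (k.find(c) if c in k else len(k), c))
-- ===== Notes on version B (the rewrite author's own statement) =====
-- stated objective: alternative
-- what changed: Replaces A's two append-loops with their linear membership rescans by a single stable sort of the fixed 26-letter alphabet keyed on (first-occurrence index of the letter in the lowered key, letter).
import Mathlib
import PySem

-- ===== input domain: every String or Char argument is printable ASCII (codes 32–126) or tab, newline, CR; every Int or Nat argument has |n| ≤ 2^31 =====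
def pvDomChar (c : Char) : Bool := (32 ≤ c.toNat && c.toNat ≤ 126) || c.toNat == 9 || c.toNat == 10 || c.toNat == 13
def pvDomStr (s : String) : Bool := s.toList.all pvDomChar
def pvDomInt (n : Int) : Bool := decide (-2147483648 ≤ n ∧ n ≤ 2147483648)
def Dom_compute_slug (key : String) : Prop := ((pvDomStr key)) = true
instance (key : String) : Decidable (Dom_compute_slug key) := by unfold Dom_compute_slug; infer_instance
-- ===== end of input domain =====

-- B replaces A's two append-loops by a single stable sort of the fixed alphabet keyed on
-- (first-occurrence index of the letter in the lowered key, letter); measurably faster in CPython (work moves into str.find/sorted).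

-- ===== PORT A =====
def ALPHABET : List String :=
  ["a", "b", "c", "d", "e", "f", "g", "h", "i", "j", "k", "l", "m", "n", "o", "p", "q", "r", "s", "t", "u",
   "v", "w", "x", "y", "z"]

def compute_slug (key : String) : List String :=
  -- first loop: for i in key: ch = i.lower(); if ch in ALPHABET and ch not in result: result.append(ch)
  let result := key.toList.foldl
    (fun res i =>
      let ch := PySem.Str.lower (String.ofList [i])
      if ch ∈ ALPHABET then (if ch ∉ res then res ++ [ch] else res) else res) []
  -- second loop: for i in ALPHABET: if i not in result: result.append(i)
  ALPHABET.foldl (fun res i => if i ∉ res then res ++ [i] else res) result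

-- ===== PORT B =====
def compute_slug_alt (key : String) : List String :=
  let k := PySem.Str.lower key
  -- sorted(ALPHABET, key=lambda c: (k.find(c) if c in k else len(k), c)); the string tie-break
  -- component c is ported as c.toList (Python compares strings by code points = List Char lex order)
  PySem.List.sorted2 ALPHABET
    (fun c => if PySem.Str.isIn c k then PySem.Str.find k c else PySem.Str.len k)
    (fun c => c.toList)

-- ===== PRECONDITION & SPEC =====
def Spec_compute_slug (key : String) (out : List String) : Prop := out = compute_slug_alt key
instance (key : String) (out : List String) : Decidable (Spec_compute_slug key out) := by unfold Spec_compute_slug; infer_instance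

-- ===== CLAIM (what is proved, stated in full; the proofs are below) =====
def Claim_equal_compute_slug : Prop := ∀ (key : String), Dom_compute_slug key → Spec_compute_slug key (compute_slug key)

-- ===== LEMMAS AND PROOFS =====

def mk1 (c : Char) : String := String.ofList [c]

def letters : List Char :=
  ['a', 'b', 'c', 'd', 'e', 'f', 'g', 'h', 'i', 'j', 'k', 'l', 'm',
   'n', 'o', 'p', 'q', 'r', 's', 't', 'u', 'v', 'w', 'x', 'y', 'z']

theorem ALPHABET_eq : ALPHABET = letters.map mk1 := by decide

theorem mk1_inj : Function.Injective mk1 := by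
  intro a b h
  have := congrArg String.toList h
  simpa [mk1] using this

-- sorted2 with an Int first key and a List Char tie-break is a sort by the lexicographic pair,
-- so any strictly increasing rearrangement names its value.
theorem sorted2_eq_lex {α : Type} (xs ys : List α) (k1 : α → Int) (k2 : α → List Char)
    (hperm : ys.Perm xs)
    (hpw : ys.Pairwise (fun a b => k1 a < k1 b ∨ (k1 a = k1 b ∧ k2 a < k2 b))) :
    PySem.List.sorted2 xs k1 k2 false = ys := by
  have hbef : (fun (a b : α) => decide (k1 a < k1 b) || (!decide (k1 b < k1 a) && decide (k2 a < k2 b)))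
      = (fun a b => decide (toLex (k1 a, k2 a) < toLex (k1 b, k2 b))) := by
    funext a b
    have h : (toLex (k1 a, k2 a) < toLex (k1 b, k2 b)) ↔ (k1 a < k1 b ∨ (k1 a = k1 b ∧ k2 a < k2 b)) := by
      rw [Prod.Lex.lt_iff]; simp
    simp only [h]
    by_cases h1 : k1 a < k1 b <;> by_cases h2 : k1 b < k1 a <;> by_cases h3 : k2 a < k2 b <;>
      simp [h1, h2, h3] <;> omega
  have h : PySem.List.sorted2 xs k1 k2 false
      = PySem.List.sorted xs (fun x => toLex (k1 x, k2 x)) false := by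
    show List.foldl (fun acc x => PySem.List.insertBy
        (fun a b => decide (k1 a < k1 b) || (!decide (k1 b < k1 a) && decide (k2 a < k2 b))) x acc) [] xs = _
    rw [hbef, ← PySem.List.sorted_eq_foldl_insertBy]
  rw [h]
  exact PySem.List.sorted_eq_of_perm_of_pairwise_lt _ _ _ hperm
    (hpw.imp (fun {a b} hab => by rw [Prod.Lex.lt_iff]; simpa using hab))

-- A's "if x not in res: res.append(x)" loop from the empty accumulator is ordered dedup
theorem foldl_add_eq_dedup (l : List String) :
    l.foldl (fun res x => if x ∉ res then res ++ [x] else res) [] = PySem.List.dedup l := by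
  rw [PySem.List.dedup_eq_ofList, PySem.Set.ofList_eq_foldl]
  apply PySem.List.foldl_congr_mem
  intro acc x _
  by_cases hx : x ∈ acc
  · simp [hx]
  · simp [hx]

-- the same loop over a duplicate-free list appends exactly the missing elements, in order
theorem foldl_add_nodup (l : List String) : ∀ (acc : List String), l.Nodup →
    l.foldl (fun res x => if x ∉ res then res ++ [x] else res) acc
      = acc ++ l.filter (fun x => decide (x ∉ acc)) := by
  induction l with
  | nil => simp
  | cons x t ih =>
    intro acc hnd
    rw [List.nodup_cons] at hnd
    simp only [List.foldl_cons, List.filter_cons]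
    by_cases hx : x ∈ acc
    · rw [if_neg (not_not_intro hx), ih acc hnd.2]
      simp [hx]
    · rw [if_pos hx, ih (acc ++ [x]) hnd.2]
      have hf : t.filter (fun y => decide (y ∉ acc ++ [x])) = t.filter (fun y => decide (y ∉ acc)) := by
        apply List.filter_congr
        intro y hy
        have hne : y ≠ x := fun h => hnd.1 (h ▸ hy)
        simp [hne]
      rw [hf]
      simp [hx]

-- the dedup of a list is ordered by first occurrence
theorem dedup_pairwise_idxOf (l : List String) :
    (PySem.List.dedup l).Pairwise (fun x y => l.idxOf x < l.idxOf y) := by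
  rw [PySem.List.dedup_eq_ofList]
  induction l with
  | nil => simp
  | cons c t ih =>
    rw [PySem.Set.ofList_cons]
    constructor
    · intro y hy
      have hyne : y ≠ c := ((PySem.Set.mem_discard _ _ _).1 hy).2
      rw [List.idxOf_cons_self, List.idxOf_cons_ne _ (Ne.symm hyne)]
      omega
    · have hfil : (PySem.Set.ofList t).discard c
          = (PySem.Set.ofList t).filter (fun y => !(y == c)) := rfl
      rw [hfil]
      apply List.Pairwise.imp_of_mem _ (ih.filter _)
      intro a b ha hb hab
      have hane : a ≠ c := by simpa using (List.of_mem_filter ha)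
      have hbne : b ≠ c := by simpa using (List.of_mem_filter hb)
      rw [List.idxOf_cons_ne _ (Ne.symm hane), List.idxOf_cons_ne _ (Ne.symm hbne)]
      omega

-- first-occurrence order is preserved by filtering
theorem idxOf_filter_mono (l : List Char) (p : Char → Bool) : ∀ (a b : Char),
    a ∈ l.filter p → b ∈ l.filter p →
    (l.filter p).idxOf a < (l.filter p).idxOf b → l.idxOf a < l.idxOf b := by
  induction l with
  | nil => simp
  | cons c t ih =>
    intro a b ha hb h
    by_cases hc : p c
    · rw [List.filter_cons_of_pos hc] at ha hb h
      by_cases hac : a = c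
      · subst hac
        have hbc : b ≠ a := by
          rintro rfl; simp at h
        rw [List.idxOf_cons_self, List.idxOf_cons_ne _ (Ne.symm hbc)]
        omega
      · by_cases hbc : b = c
        · subst hbc
          rw [List.idxOf_cons_ne _ (Ne.symm hac), List.idxOf_cons_self] at h
          omega
        · rw [List.idxOf_cons_ne _ (Ne.symm hac), List.idxOf_cons_ne _ (Ne.symm hbc)] at h ⊢
          have := ih a b (by simpa [hac] using ha) (by simpa [hbc] using hb) (by omega)
          omega
    · rw [List.filter_cons_of_neg hc] at ha hb h
      have hac : a ≠ c := by rintro rfl; exact hc (List.of_mem_filter ha)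
      have hbc : b ≠ c := by rintro rfl; exact hc (List.of_mem_filter hb)
      rw [List.idxOf_cons_ne _ (Ne.symm hac), List.idxOf_cons_ne _ (Ne.symm hbc)]
      have := ih a b ha hb h
      omega

theorem singleton_prefix_iff (a : Char) (t : List Char) : [a] <+: t ↔ t.head? = some a := by
  constructor
  · rintro ⟨u, rfl⟩; rfl
  · intro h
    cases t with
    | nil => simp at h
    | cons b u => simp at h; exact ⟨u, by simp [h]⟩

theorem singleton_infix_iff (a : Char) (t : List Char) : [a] <:+: t ↔ a ∈ t := by
  constructor
  · rintro ⟨s, u, rfl⟩; simp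
  · intro h
    obtain ⟨s, u, rfl⟩ := List.append_of_mem h
    exact ⟨s, u, by simp⟩

theorem idxOf_min (l : List Char) (a : Char) : ∀ i, i < l.idxOf a → l[i]? ≠ some a := by
  induction l with
  | nil => simp
  | cons c t ih =>
    intro i hi
    by_cases hac : c = a
    · subst hac; rw [List.idxOf_cons_self] at hi; omega
    · rw [List.idxOf_cons_ne _ hac] at hi
      cases i with
      | zero => simpa using hac
      | succ j => simpa using ih j (by omega)

-- find of a one-char needle that occurs is its first-occurrence index
theorem find_singleton (l : List Char) (a : Char) (h : a ∈ l) :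
    PySem.Chars.find l [a] = (l.idxOf a : Int) := by
  have h0 : 0 ≤ PySem.Chars.find l [a] :=
    (PySem.Chars.find_nonneg_iff _ _).2 ((singleton_infix_iff _ _).2 h)
  obtain ⟨hpre, hmin⟩ := PySem.Chars.find_spec h0
  set n := (PySem.Chars.find l [a]).toNat with hn_def
  have hn : l[n]? = some a := by rw [← List.head?_drop]; exact (singleton_prefix_iff _ _).1 hpre
  have h1 : l.idxOf a ≤ n := by
    by_contra hlt
    exact idxOf_min l a n (by omega) hn
  have hidx_lt : l.idxOf a < l.length := List.idxOf_lt_length_of_mem h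
  have h2 : ¬ (l.idxOf a < n) := by
    intro hlt
    apply hmin _ hlt
    rw [singleton_prefix_iff, List.head?_drop]
    simp [List.getElem?_eq_getElem hidx_lt, List.getElem_idxOf]
  omega

theorem idxOf_map_mk1 (l : List Char) (a : Char) :
    (l.map mk1).idxOf (mk1 a) = l.idxOf a := by
  induction l with
  | nil => rfl
  | cons c t ih =>
    by_cases hac : c = a
    · subst hac; simp [List.idxOf_cons_self]
    · have h1 : mk1 c ≠ mk1 a := fun h => hac (mk1_inj h)
      rw [List.map_cons, List.idxOf_cons_ne _ h1, List.idxOf_cons_ne _ hac, ih]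

-- A's result: the deduplicated key letters followed by the remaining alphabet
theorem A_norm (key : String) :
    compute_slug key =
      PySem.List.dedup (((PySem.Chars.lower key.toList).map mk1).filter (fun s => decide (s ∈ ALPHABET)))
        ++ ALPHABET.filter (fun c => decide (c ∉
          PySem.List.dedup (((PySem.Chars.lower key.toList).map mk1).filter (fun s => decide (s ∈ ALPHABET))))) := by
  unfold compute_slug
  have hch : ∀ i : Char, PySem.Str.lower (String.ofList [i]) = mk1 (PySem.Chars.lowerChar i) := by
    intro i; simp [PySem.Str.lower, PySem.Chars.lower, mk1]
  have h1 : key.toList.foldl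
      (fun res i =>
        let ch := PySem.Str.lower (String.ofList [i])
        if ch ∈ ALPHABET then (if ch ∉ res then res ++ [ch] else res) else res) []
      = ((PySem.Chars.lower key.toList).map mk1).foldl
          (fun res ch => if ch ∈ ALPHABET then (if ch ∉ res then res ++ [ch] else res) else res) [] := by
    rw [PySem.Chars.lower, List.map_map, List.foldl_map]
    apply PySem.List.foldl_congr_mem
    intro acc i _
    simp only [Function.comp, hch i]
  rw [h1, PySem.List.foldl_ite_eq_foldl_filter (p := fun ch => ch ∈ ALPHABET)
      (f := fun res ch => if ch ∉ res then res ++ [ch] else res),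
    foldl_add_eq_dedup, foldl_add_nodup _ _ (by decide)]

-- B's sort evaluates to the same list: the key letters are strictly rank-increasing, the
-- remaining letters all share rank len(k) and are tie-broken alphabetically.
theorem B_eval (key : String) :
    compute_slug_alt key =
      PySem.List.dedup (((PySem.Chars.lower key.toList).map mk1).filter (fun s => decide (s ∈ ALPHABET)))
        ++ ALPHABET.filter (fun c => decide (c ∉
          PySem.List.dedup (((PySem.Chars.lower key.toList).map mk1).filter (fun s => decide (s ∈ ALPHABET))))) := by
  set kl := PySem.Chars.lower key.toList with hkl
  set M : List String := (kl.map mk1).filter (fun s => decide (s ∈ ALPHABET)) with hM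
  set P : List String := PySem.List.dedup M with hP
  set rank : String → Int := fun c =>
    if PySem.Str.isIn c (PySem.Str.lower key) then PySem.Str.find (PySem.Str.lower key) c
    else PySem.Str.len (PySem.Str.lower key) with hrank
  have htl : (PySem.Str.lower key).toList = kl := by simp [hkl]
  have hlen : PySem.Str.len (PySem.Str.lower key) = (kl.length : Int) := by
    rw [PySem.Str.len_eq, htl]
  have hisIn : ∀ γ : Char, PySem.Str.isIn (mk1 γ) (PySem.Str.lower key) = decide (γ ∈ kl) := by
    intro γ
    rw [PySem.Str.isIn_eq, htl]
    by_cases h : γ ∈ kl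
    · simp [h, PySem.Chars.isIn_iff_infix, (singleton_infix_iff γ kl).2 h, mk1]
    · simp only [mk1, String.toList_ofList]
      rw [(PySem.Chars.isIn_eq_false_iff _ _).2 (fun hin => h ((singleton_infix_iff γ kl).1 hin))]
      simp [h]
  have hfind : ∀ γ : Char, γ ∈ kl →
      PySem.Str.find (PySem.Str.lower key) (mk1 γ) = (kl.idxOf γ : Int) := by
    intro γ hγ
    rw [PySem.Str.find_eq, htl]
    simpa [mk1] using find_singleton kl γ hγ
  have hrank_mem : ∀ γ : Char, γ ∈ kl → rank (mk1 γ) = (kl.idxOf γ : Int) := by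
    intro γ hγ
    rw [hrank]
    simp only [hisIn γ, hγ, decide_true, if_true]
    exact hfind γ hγ
  have hrank_not : ∀ γ : Char, γ ∉ kl → rank (mk1 γ) = (kl.length : Int) := by
    intro γ hγ
    rw [hrank]
    simp only [hisIn γ, hγ, decide_false]
    exact hlen
  have hMP : ∀ s, s ∈ P ↔ s ∈ M := fun s => PySem.List.mem_dedup _ _
  have hPsub : ∀ s ∈ P, s ∈ ALPHABET := by
    intro s hs
    have := (hMP s).1 hs
    rw [hM] at this
    simpa using (List.mem_filter.1 this).2
  have hAn : ALPHABET.Nodup := by decide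
  have hPn : P.Nodup := PySem.List.nodup_dedup _
  have hp1 : P.Perm (ALPHABET.filter (fun c => decide (c ∈ P))) := by
    rw [List.perm_ext_iff_of_nodup hPn (hAn.filter _)]
    intro s
    simp only [List.mem_filter, decide_eq_true_eq]
    exact ⟨fun h => ⟨hPsub s h, h⟩, fun h => h.2⟩
  have hperm : (P ++ ALPHABET.filter (fun c => decide (c ∉ P))).Perm ALPHABET := by
    have hnotP : (fun c => decide (c ∉ P)) = fun c => !decide (c ∈ P) := by
      funext c; exact decide_not
    refine (hp1.append_right _).trans ?_
    rw [hnotP]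
    exact List.filter_append_perm _ ALPHABET
  have hPchar : ∀ s ∈ P, ∃ γ, γ ∈ kl ∧ s = mk1 γ := by
    intro s hs
    have hsM := (hMP s).1 hs
    rw [hM] at hsM
    obtain ⟨γ, hγ, rfl⟩ := List.mem_map.1 (List.mem_of_mem_filter hsM)
    exact ⟨γ, hγ, rfl⟩
  have hsuffix_rank : ∀ b ∈ ALPHABET.filter (fun c => decide (c ∉ P)), rank b = (kl.length : Int) := by
    intro b hb
    have hbA : b ∈ ALPHABET := List.mem_of_mem_filter hb
    have hbP : b ∉ P := by simpa using List.of_mem_filter hb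
    obtain ⟨β, hβ, rfl⟩ := List.mem_map.1 (ALPHABET_eq ▸ hbA)
    have hβkl : β ∉ kl := by
      intro hmem
      apply hbP
      rw [hMP, hM]
      exact List.mem_filter.2 ⟨List.mem_map.2 ⟨β, hmem, rfl⟩, by simpa using hbA⟩
    exact hrank_not β hβkl
  have hMfm : M = (kl.filter (fun γ => decide (mk1 γ ∈ ALPHABET))).map mk1 := by
    rw [hM, List.filter_map]
    rfl
  have hpwP : P.Pairwise (fun a b => rank a < rank b) := by
    apply (dedup_pairwise_idxOf M).imp_of_mem
    intro a b ha hb hab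
    rw [← hP] at ha hb
    obtain ⟨α, hα, rfl⟩ := hPchar a ha
    obtain ⟨β, hβ, rfl⟩ := hPchar b hb
    have haM : mk1 α ∈ M := (hMP _).1 ha
    have hbM : mk1 β ∈ M := (hMP _).1 hb
    rw [hMfm] at haM hbM hab
    obtain ⟨α', hα', hα'e⟩ := List.mem_map.1 haM
    obtain ⟨β', hβ', hβ'e⟩ := List.mem_map.1 hbM
    have hαf : α ∈ kl.filter (fun γ => decide (mk1 γ ∈ ALPHABET)) := by
      rwa [mk1_inj hα'e] at hα'
    have hβf : β ∈ kl.filter (fun γ => decide (mk1 γ ∈ ALPHABET)) := by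
      rwa [mk1_inj hβ'e] at hβ'
    rw [idxOf_map_mk1, idxOf_map_mk1] at hab
    have hlt := idxOf_filter_mono kl _ α β hαf hβf hab
    rw [hrank_mem α hα, hrank_mem β hβ]
    exact_mod_cast hlt
  have hbase : ALPHABET.Pairwise (fun a b => a.toList < b.toList) := by decide
  have hpwR : (P ++ ALPHABET.filter (fun c => decide (c ∉ P))).Pairwise
      (fun a b => rank a < rank b ∨ (rank a = rank b ∧ a.toList < b.toList)) := by
    rw [List.pairwise_append]
    refine ⟨hpwP.imp (fun h => Or.inl h), ?_, ?_⟩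
    · apply (hbase.sublist (List.filter_sublist)).imp_of_mem
      intro a b ha hb hab
      exact Or.inr ⟨by rw [hsuffix_rank a ha, hsuffix_rank b hb], hab⟩
    · intro a ha b hb
      left
      obtain ⟨α, hα, rfl⟩ := hPchar a ha
      rw [hrank_mem α hα, hsuffix_rank b hb]
      exact_mod_cast List.idxOf_lt_length_of_mem hα
  show compute_slug_alt key = P ++ ALPHABET.filter (fun c => decide (c ∉ P))
  unfold compute_slug_alt
  exact sorted2_eq_lex _ _ _ _ hperm hpwR

-- ===== VERDICT (by name: the statement is the Claim_ definition above) =====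
theorem compute_slug_spec : Claim_equal_compute_slug := by
  intro key _
  show compute_slug key = compute_slug_alt key
  rw [A_norm, B_eval]
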